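-- pv_equiv track=rewrite | github.com/sudhanssss99/Bot | bot.py | format_cookie_string
-- ===== SOURCE A (Python) =====
-- DESIRED_ORDER = [
--     "V", "LS", "EI", "mE", "mN", "uI", "un", "MN", "CI", "PK",
--     "SN", "G", "A", "U", "R", "C", "M", "GUID", "bookingType"
-- ]
--
-- def format_cookie_string(cookie_string: str) -> str:
--     if not cookie_string:
--         return ""
--     cookies = {}
--     for item in cookie_string.split(';'):
--         if '=' in item:
--             name, value = item.strip().split('=', 1)
--             cookies[name] = value
--     ordered_cookies = []
--     for name in DESIRED_ORDER:
--         if name in cookies: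
--             ordered_cookies.append(f"{name}={cookies[name]}")
--             del cookies[name]
--     remaining_names = sorted(cookies.keys())
--     for name in remaining_names:
--         ordered_cookies.append(f"{name}={cookies[name]}")
--     return "; ".join(ordered_cookies)
-- ===== SOURCE B (Python) =====
-- DESIRED_ORDER = [
--     "V", "LS", "EI", "mE", "mN", "uI", "un", "MN", "CI", "PK",
--     "SN", "G", "A", "U", "R", "C", "M", "GUID", "bookingType"
-- ]
--
-- def format_cookie_string(cookie_string: str) -> str:
--     if not cookie_string:
--         return ""
--     rank = {name: i for i, name in enumerate(DESIRED_ORDER)}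
--     cookies = {}
--     for item in cookie_string.split(';'):
--         if '=' in item:
--             name, value = item.strip().split('=', 1)
--             cookies[name] = value
--     pairs = sorted(cookies.items(),
--                    key=lambda kv: (rank.get(kv[0], len(DESIRED_ORDER)), kv[0]))
--     return "; ".join(f"{name}={value}" for name, value in pairs)
-- ===== Notes on version B (the rewrite author's own statement) =====
-- stated objective: simpler
-- what changed: Replaces A's two-phase reordering (a loop over DESIRED_ORDER that extracts-and-deletes priority cookies, followed by a separate sort of the leftovers) with one composite-key sort of all parsed cookies using a precomputed rank map (rank, name), joined in a single pass.
import Mathlib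
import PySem

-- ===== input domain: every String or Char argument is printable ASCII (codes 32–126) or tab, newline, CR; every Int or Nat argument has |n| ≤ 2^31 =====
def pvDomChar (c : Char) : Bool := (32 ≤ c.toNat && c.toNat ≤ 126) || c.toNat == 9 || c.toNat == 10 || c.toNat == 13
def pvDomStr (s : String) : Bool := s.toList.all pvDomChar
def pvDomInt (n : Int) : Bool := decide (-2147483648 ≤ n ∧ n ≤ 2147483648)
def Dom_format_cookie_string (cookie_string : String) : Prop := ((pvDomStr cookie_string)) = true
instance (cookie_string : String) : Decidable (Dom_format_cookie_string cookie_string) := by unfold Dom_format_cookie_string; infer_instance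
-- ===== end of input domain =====

-- B replaces A's two-phase reordering (priority loop with deletion, then a sort of the
-- leftovers) by ONE composite-key sort (rank, name) over all parsed cookies: simpler.

-- ===== PORT A =====
-- the module constant DESIRED_ORDER (shared by both Pythons)
def pvDESIRED : List String :=
  ["V", "LS", "EI", "mE", "mN", "uI", "un", "MN", "CI", "PK",
   "SN", "G", "A", "U", "R", "C", "M", "GUID", "bookingType"]

-- the parsing loop body, textually identical in A and in B (same guard, same strip,
-- same split('=',1), same duplicate-overwrite), kept as one shared helper.
-- '=' ∈ item guarantees split('=',1) yields exactly [name, value]; the '_' arm is unreachable.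
def pvParseStep (d : PySem.Dict String String) (item : String) : PySem.Dict String String :=
  if PySem.Str.isIn "=" item then
    match PySem.Str.splitMax? (PySem.Str.strip item) "=" 1 with
    | some [name, value] => d.insert name value
    | _ => d
  else d

-- cookies = {}; for item in cookie_string.split(';'): …   (split? is some: sep ";" ≠ "")
def pvParse (s : String) : PySem.Dict String String :=
  ((PySem.Str.split? s ";").getD []).foldl pvParseStep PySem.Dict.empty

-- body of A's loop over DESIRED_ORDER: 'if name in cookies: append; del cookies[name]'
def pvStepA (st : List String × PySem.Dict String String) (name : String) :
    List String × PySem.Dict String String :=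
  match st.2.get? name with
  | some v => (st.1 ++ [name ++ "=" ++ v], st.2.erase name)
  | none => st

def format_cookie_string (cookie_string : String) : String :=
  if cookie_string = "" then ""
  else
    let cookies := pvParse cookie_string
    let st := pvDESIRED.foldl pvStepA ([], cookies)
    let remaining_names := PySem.List.sorted st.2.keys (fun k => k)
    let ordered :=
      remaining_names.foldl (fun acc name => acc ++ [name ++ "=" ++ st.2.getD name ""]) st.1
    PySem.Str.join "; " ordered

-- ===== PORT B =====
-- rank = {name: i for i, name in enumerate(DESIRED_ORDER)}
def pvRank : PySem.Dict String Int :=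
  (PySem.List.enumerate pvDESIRED 0).foldl (fun d p => d.insert p.2 p.1) PySem.Dict.empty

def format_cookie_string_alt (cookie_string : String) : String :=
  if cookie_string = "" then ""
  else
    let cookies := pvParse cookie_string
    let pairs := PySem.List.sorted2 cookies.items
        (fun kv => pvRank.getD kv.1 (pvDESIRED.length : Int)) (fun kv => kv.1)
    PySem.Str.join "; " (pairs.map (fun kv => kv.1 ++ "=" ++ kv.2))

-- ===== PRECONDITION & SPEC =====
def Spec_format_cookie_string (cookie_string : String) (out : String) : Prop := out = format_cookie_string_alt cookie_string
instance (cookie_string : String) (out : String) : Decidable (Spec_format_cookie_string cookie_string out) := by unfold Spec_format_cookie_string; infer_instance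

-- ===== CLAIM (what is proved, stated in full; the proofs are below) =====
def Claim_equal_format_cookie_string : Prop := ∀ (cookie_string : String), Dom_format_cookie_string cookie_string → Spec_format_cookie_string cookie_string (format_cookie_string cookie_string)

-- ===== LEMMAS AND PROOFS =====

-- The priority rank used everywhere below
def pvR (n : String) : Int := pvRank.getD n (pvDESIRED.length : Int)

-- ---- small Dict.erase facts (erase is items.filter) ----
theorem pv_get?_erase_of_ne {ν : Type} (d : PySem.Dict String ν) (k j : String) (h : j ≠ k) :
    (d.erase k).get? j = d.get? j := by
  obtain ⟨l⟩ := d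
  simp only [PySem.Dict.get?, PySem.Dict.erase, List.find?_filter]
  have : (fun (a : String × ν) => decide ((!(a.1 == k)) = true ∧ (a.1 == j) = true))
       = (fun (p : String × ν) => p.1 == j) := by
    funext p
    by_cases hp : p.1 = j <;> simp [hp, h]
  rw [this]

theorem pv_erase_of_not_contains {ν : Type} (d : PySem.Dict String ν) (k : String)
    (h : d.contains k = false) : d.erase k = d := by
  obtain ⟨l⟩ := d
  simp only [PySem.Dict.contains, List.any_eq_false] at h
  apply PySem.Dict.ext
  simp only [PySem.Dict.erase]
  apply List.filter_eq_self.2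
  intro p hp
  simpa using h p hp

theorem pv_keys_erase {ν : Type} (d : PySem.Dict String ν) (k : String) :
    (d.erase k).keys = d.keys.filter (fun x => !(x == k)) := by
  obtain ⟨l⟩ := d
  simp only [PySem.Dict.keys, PySem.Dict.erase, List.filter_map]
  rfl

-- ---- parsed dict has distinct keys ----
theorem pv_nodup_keys_parse_fold (l : List String) (d : PySem.Dict String String)
    (h : d.keys.Nodup) : (l.foldl pvParseStep d).keys.Nodup := by
  induction l generalizing d with
  | nil => exact h
  | cons x t ih =>
    apply ih
    unfold pvParseStep
    split
    · split
      · exact PySem.Dict.nodup_keys_insert _ _ _ h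
      · exact h
    · exact h

theorem pv_nodup_keys_parse (s : String) : (pvParse s).keys.Nodup := by
  apply pv_nodup_keys_parse_fold
  simp [PySem.Dict.keys_empty]

-- ---- rank facts (decidable, over the literal list) ----
theorem pv_desired_nodup : pvDESIRED.Nodup := by decide

theorem pv_rank_lt (n : String) (h : n ∈ pvDESIRED) : pvR n < (pvDESIRED.length : Int) := by
  fin_cases h <;> decide

theorem pv_rank_pairwise : pvDESIRED.Pairwise (fun a b => pvR a < pvR b) := by decide

theorem pv_rank_default (n : String) (h : n ∉ pvDESIRED) : pvR n = (pvDESIRED.length : Int) := by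
  have hk : pvRank.keys = PySem.Set.ofList pvDESIRED := by
    have h2 := PySem.Dict.keys_foldl_insert_key (ν := Int)
      (l := PySem.List.enumerate pvDESIRED 0)
      (key := fun p => p.2) (f := fun d p => p.1) (d := PySem.Dict.empty)
    simpa [pvRank, PySem.List.map_snd_enumerate, PySem.Set.ofList_eq_foldl, PySem.Set.update,
      PySem.Dict.keys_empty, PySem.Set.empty] using h2
  apply PySem.Dict.getD_of_get?_eq_none
  rw [PySem.Dict.get?_eq_none_iff_not_mem_keys, hk, PySem.Set.mem_ofList]
  exact h

-- ---- A's priority loop, characterised ----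
theorem pv_phase2 (names : List String) (hn : names.Nodup) (acc : List String)
    (d : PySem.Dict String String) :
    names.foldl pvStepA (acc, d) =
      (acc ++ (names.filter (fun n => d.contains n)).map (fun n => n ++ "=" ++ d.getD n ""),
       names.foldl (fun d n => d.erase n) d) := by
  induction names generalizing acc d with
  | nil => simp
  | cons n t ih =>
    obtain ⟨hnt, hT⟩ := List.nodup_cons.1 hn
    rw [List.foldl_cons, List.foldl_cons]
    cases hg : d.get? n with
    | none =>
      have hc : d.contains n = false := by
        rw [PySem.Dict.contains_eq_isSome_get?, hg]; rfl
      have he : d.erase n = d := pv_erase_of_not_contains d n hc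
      rw [show pvStepA (acc, d) n = (acc, d) by simp [pvStepA, hg], ih hT, he]
      simp [hc]
    | some v =>
      have hc : d.contains n = true := by
        rw [PySem.Dict.contains_eq_isSome_get?, hg]; rfl
      rw [show pvStepA (acc, d) n = (acc ++ [n ++ "=" ++ v], d.erase n) by simp [pvStepA, hg],
        ih hT]
      have hfilt : t.filter (fun m => (d.erase n).contains m) = t.filter (fun m => d.contains m) := by
        apply List.filter_congr
        intro m hm
        have hmn : m ≠ n := fun h => hnt (h ▸ hm)
        rw [PySem.Dict.contains_eq_isSome_get?, PySem.Dict.contains_eq_isSome_get?,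
          pv_get?_erase_of_ne d n m hmn]
      have hmap : (t.filter (fun m => d.contains m)).map
            (fun m => m ++ "=" ++ (d.erase n).getD m "")
          = (t.filter (fun m => d.contains m)).map (fun m => m ++ "=" ++ d.getD m "") := by
        apply List.map_congr_left
        intro m hm
        have hmn : m ≠ n := fun h => hnt (h ▸ (List.mem_of_mem_filter hm))
        rw [PySem.Dict.getD, PySem.Dict.getD, pv_get?_erase_of_ne d n m hmn]
      rw [hfilt, hmap]
      have hgd : d.getD n "" = v := PySem.Dict.getD_of_get?_eq_some d "" hg
      simp [hc, hgd]

-- ---- the erased dict: lookups and keys ----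
theorem pv_get?_foldl_erase (names : List String) (d : PySem.Dict String String) (j : String)
    (h : j ∉ names) : (names.foldl (fun d n => d.erase n) d).get? j = d.get? j := by
  induction names generalizing d with
  | nil => rfl
  | cons n t ih =>
    simp only [List.mem_cons, not_or] at h
    rw [List.foldl_cons, ih _ h.2]
    exact pv_get?_erase_of_ne d n j h.1

theorem pv_keys_foldl_erase (names : List String) (d : PySem.Dict String String) :
    (names.foldl (fun d n => d.erase n) d).keys
      = d.keys.filter (fun k => !(decide (k ∈ names))) := by
  induction names generalizing d with
  | nil => simp
  | cons n t ih =>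
    rw [List.foldl_cons, ih, pv_keys_erase, List.filter_filter]
    apply List.filter_congr
    intro k _
    by_cases h1 : k = n <;> by_cases h2 : k ∈ t <;> simp [h1, h2]

-- ---- sorted2 with an (Int, String) tuple key is sorted with the lexicographic key ----
theorem pv_sorted2_eq_sorted_lex {α : Type} (xs : List α) (k1 : α → Int) (k2 : α → String) :
    PySem.List.sorted2 xs k1 k2 = PySem.List.sorted xs (fun x => toLex (k1 x, k2 x)) := by
  rw [PySem.List.sorted_eq_foldl_insertBy]
  show List.foldl (fun acc x => PySem.List.insertBy
      (fun a b => decide (k1 a < k1 b) || !decide (k1 b < k1 a) && decide (k2 a < k2 b)) x acc) [] xs = _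
  have hcmp : (fun (a b : α) => decide (k1 a < k1 b) || !decide (k1 b < k1 a) && decide (k2 a < k2 b))
      = (fun a b => decide ((toLex (k1 a, k2 a)) < (toLex (k1 b, k2 b)))) := by
    funext a b
    simp only [Prod.Lex.lt_iff]
    by_cases h1 : k1 a < k1 b
    · simp [h1, asymm h1]
    · by_cases h2 : k1 b < k1 a
      · have hne : k1 a ≠ k1 b := fun h => absurd (h ▸ h2) (lt_irrefl _)
        simp [h1, h2, hne]
      · have he : k1 a = k1 b := le_antisymm (not_lt.1 h2) (not_lt.1 h1)
        by_cases h3 : k2 a < k2 b <;> simp [h3, he]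
  rw [hcmp]

-- ---- the main list-level identity ----
theorem pv_main (d : PySem.Dict String String) (hnd : d.keys.Nodup) :
    PySem.List.sorted2 d.items
        (fun kv => pvRank.getD kv.1 (pvDESIRED.length : Int)) (fun kv => kv.1)
      = (pvDESIRED.filter (fun n => d.contains n)).map (fun n => (n, d.getD n ""))
        ++ (PySem.List.sorted (d.keys.filter (fun k => !(decide (k ∈ pvDESIRED)))) (fun k => k)).map
            (fun n => (n, d.getD n "")) := by
  rw [pv_sorted2_eq_sorted_lex]
  rw [← List.map_append]
  apply PySem.List.sorted_eq_of_perm_of_pairwise_lt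
  · -- permutation
    rw [PySem.Dict.items_eq_map_keys d hnd ""]
    apply List.Perm.map
    apply List.Perm.trans (l₂ := d.keys.filter (fun k => decide (k ∈ pvDESIRED))
        ++ d.keys.filter (fun k => !(decide (k ∈ pvDESIRED))))
    · apply List.Perm.append
      · apply List.perm_of_nodup_nodup_toFinset_eq
        · exact pv_desired_nodup.filter _
        · exact hnd.filter _
        · ext x
          simp [PySem.Dict.contains_iff_mem_keys, and_comm]
      · exact PySem.List.sorted_perm _ _ _
    · exact List.filter_append_perm _ _
  · -- pairwise strictly increasing lex keys
    rw [List.pairwise_map]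
    show List.Pairwise (fun a b => toLex (pvR a, a) < toLex (pvR b, b)) _
    rw [List.pairwise_append]
    refine ⟨?_, ?_, ?_⟩
    · -- priority block: ranks strictly increase along DESIRED_ORDER
      have h1 : (pvDESIRED.filter (fun n => d.contains n)).Pairwise (fun a b => pvR a < pvR b) :=
        List.Pairwise.sublist (List.filter_sublist) pv_rank_pairwise
      exact h1.imp (fun h => Prod.Lex.lt_iff.2 (Or.inl h))
    · -- remaining block: equal rank, strictly increasing names
      have hsub : (PySem.List.sorted (d.keys.filter (fun k => !(decide (k ∈ pvDESIRED))))
          (fun k => k)).Pairwise (fun a b => a ≤ b) := PySem.List.sorted_pairwise _ _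
      have hnod : (PySem.List.sorted (d.keys.filter (fun k => !(decide (k ∈ pvDESIRED))))
          (fun k => k)).Nodup :=
        ((PySem.List.sorted_perm _ _ _).symm.nodup (hnd.filter _))
      have hlt := (hsub.and hnod).imp (fun h => lt_of_le_of_ne h.1 h.2)
      apply hlt.imp_of_mem
      intro a b ha hb hab
      have hra : pvR a = (pvDESIRED.length : Int) := by
        apply pv_rank_default
        have := (PySem.List.mem_sorted _ _ _ _).1 ha
        simpa using (List.mem_filter.1 this).2
      have hrb : pvR b = (pvDESIRED.length : Int) := by
        apply pv_rank_default
        have := (PySem.List.mem_sorted _ _ _ _).1 hb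
        simpa using (List.mem_filter.1 this).2
      exact Prod.Lex.lt_iff.2 (Or.inr ⟨hra.trans hrb.symm, hab⟩)
    · -- priority cookies sort before all remaining ones
      intro a ha b hb
      have hra : pvR a < (pvDESIRED.length : Int) :=
        pv_rank_lt a (List.mem_of_mem_filter ha)
      have hrb : pvR b = (pvDESIRED.length : Int) := by
        apply pv_rank_default
        have := (PySem.List.mem_sorted _ _ _ _).1 hb
        simpa using (List.mem_filter.1 this).2
      exact Prod.Lex.lt_iff.2 (Or.inl (hrb ▸ hra))

-- ===== VERDICT (by name: the statement is the Claim_ definition above) =====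
theorem format_cookie_string_spec : Claim_equal_format_cookie_string := by
  intro s _
  unfold Spec_format_cookie_string format_cookie_string format_cookie_string_alt
  by_cases hs : s = ""
  · simp [hs]
  · simp only [hs, if_false]
    set d := pvParse s with hd
    have hnd : d.keys.Nodup := pv_nodup_keys_parse s
    rw [pv_phase2 pvDESIRED pv_desired_nodup [] d]
    rw [PySem.List.foldl_append_singleton_eq_map]
    rw [pv_keys_foldl_erase]
    rw [pv_main d hnd]
    apply congrArg
    rw [List.nil_append, List.map_append, List.map_map, List.map_map]
    refine congrArg₂ (· ++ ·) ?_ ?_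
    · apply List.map_congr_left
      intro n _
      rfl
    · apply List.map_congr_left
      intro n hn
      have hmem := (PySem.List.mem_sorted _ _ _ _).1 hn
      have hnot : n ∉ pvDESIRED := by simpa using (List.mem_filter.1 hmem).2
      show n ++ "=" ++ (List.foldl (fun d n => d.erase n) d pvDESIRED).getD n ""
         = n ++ "=" ++ d.getD n ""
      rw [PySem.Dict.getD, PySem.Dict.getD, pv_get?_foldl_erase pvDESIRED d n hnot]
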